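-- pv_equiv track=rewrite | github.com/marcosbondrpc/solana2 | services/detector/train_transformer.py | detect_sandwich_pattern
-- ===== SOURCE A (Python) =====
-- from typing import List, Tuple, Dict, Optional
--
-- def detect_sandwich_pattern(sequence: List[int]) -> bool:
--     """Heuristic detection of sandwich pattern"""
--     # Look for swap-swap-swap pattern with same pool
--     swap_indices = [10, 14, 15, 20, 21]  # All swap instructions
--
--     swap_positions = []
--     for i, ix in enumerate(sequence):
--         if ix in swap_indices:
--             swap_positions.append(i)
--
--     # Check for 3 swaps in quick succession
--     if len(swap_positions) >= 3:
--         for i in range(len(swap_positions) - 2):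
--             if swap_positions[i+2] - swap_positions[i] <= 5:  # Within 5 instructions
--                 return True
--
--     return False
-- ===== SOURCE B (Python) =====
-- def detect_sandwich_pattern(sequence):
--     """Heuristic detection of sandwich pattern (streaming sliding window)."""
--     swap_indices = {10, 14, 15, 20, 21}
--     recent = []  # positions of recent swaps within the last 5 instructions
--     for i, ix in enumerate(sequence):
--         if ix in swap_indices:
--             recent.append(i)
--             while i - recent[0] > 5:
--                 recent.pop(0)
--             if len(recent) >= 3:
--                 return True
--     return False
-- ===== Notes on version B (the rewrite author's own statement) =====
-- stated objective: alternative
-- what changed: Replaced A's two-phase build-the-full-swap-position-list-then-scan-all-triples structure with a single streaming pass that maintains a sliding window (deque) of swap positions within the last 5 instructions and returns as soon as the window holds 3 swaps.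
import Mathlib
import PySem

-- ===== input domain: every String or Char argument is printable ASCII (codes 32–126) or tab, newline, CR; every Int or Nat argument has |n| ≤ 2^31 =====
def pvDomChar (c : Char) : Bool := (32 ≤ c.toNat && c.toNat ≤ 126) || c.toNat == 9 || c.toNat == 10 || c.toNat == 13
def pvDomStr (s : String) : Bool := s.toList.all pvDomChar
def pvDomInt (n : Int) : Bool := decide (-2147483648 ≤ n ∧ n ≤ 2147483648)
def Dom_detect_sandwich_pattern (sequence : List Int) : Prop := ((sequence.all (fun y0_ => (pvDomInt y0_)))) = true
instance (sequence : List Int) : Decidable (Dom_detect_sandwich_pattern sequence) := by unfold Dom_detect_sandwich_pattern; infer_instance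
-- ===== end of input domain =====

-- B replaces A's build-the-full-swap-position-list-then-scan-consecutive-triples structure with a
-- single streaming pass that keeps a sliding window of swap positions within the last 5 instructions
-- (objective: alternative decomposition, same return value).

-- ===== PORT A =====
def detect_sandwich_pattern (sequence : List Int) : Bool :=
  let swap_indices : List Int := [10, 14, 15, 20, 21]
  let swap_positions : List Int :=
    (PySem.List.enumerate sequence).foldl
      (fun acc p => if p.2 ∈ swap_indices then acc ++ [p.1] else acc) []
  if 3 ≤ swap_positions.length then
    (PySem.List.pyRange 0 ((swap_positions.length : Int) - 2) 1).any
      (fun i => decide (PySem.List.pyGetD swap_positions (i + 2) 0 -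
                        PySem.List.pyGetD swap_positions i 0 ≤ 5))
  else false

-- ===== PORT B =====
-- 'while i - recent[0] > 5: recent.pop(0)'
def pvDropOld (i : Int) : List Int → List Int
  | [] => []
  | x :: xs => if 5 < i - x then pvDropOld i xs else x :: xs

-- the 'for i, ix in enumerate(sequence)' loop with early return
def pvAltGo (swaps : List Int) (recent : List Int) : List (Int × Int) → Bool
  | [] => false
  | (i, ix) :: rest =>
    if ix ∈ swaps then
      let recent' := pvDropOld i (recent ++ [i])
      if 3 ≤ recent'.length then true else pvAltGo swaps recent' rest
    else pvAltGo swaps recent rest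

def detect_sandwich_pattern_alt (sequence : List Int) : Bool :=
  pvAltGo [10, 14, 15, 20, 21] [] (PySem.List.enumerate sequence)

-- ===== PRECONDITION & SPEC =====
def Spec_detect_sandwich_pattern (sequence : List Int) (out : Bool) : Prop := out = detect_sandwich_pattern_alt sequence
instance (sequence : List Int) (out : Bool) : Decidable (Spec_detect_sandwich_pattern sequence out) := by unfold Spec_detect_sandwich_pattern; infer_instance

-- ===== CLAIM (what is proved, stated in full; the proofs are below) =====
def Claim_equal_detect_sandwich_pattern : Prop := ∀ (sequence : List Int), Dom_detect_sandwich_pattern sequence → Spec_detect_sandwich_pattern sequence (detect_sandwich_pattern sequence)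

-- ===== LEMMAS AND PROOFS =====

-- 'some three consecutive swap positions span ≤ 5' as a structural recursion
def pvTriple : List Int → Bool
  | a :: b :: c :: t => decide (c - a ≤ 5) || pvTriple (b :: c :: t)
  | _ => false

-- B's loop restricted to the swap positions themselves
def pvStream (r : List Int) : List Int → Bool
  | [] => false
  | i :: s =>
    let r' := pvDropOld i (r ++ [i])
    if 3 ≤ r'.length then true else pvStream r' s

lemma pvTriple_cons (x : Int) (l : List Int) (h : pvTriple l = true) :
    pvTriple (x :: l) = true := by
  match l with
  | [] => simp [pvTriple] at h
  | [b] => simp [pvTriple] at h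
  | b :: c :: t => simp [pvTriple] at h ⊢; tauto

lemma pvTriple_mid (u : List Int) (a b c : Int) (v : List Int) (h : c - a ≤ 5) :
    pvTriple (u ++ a :: b :: c :: v) = true := by
  induction u with
  | nil => simp [pvTriple, h]
  | cons x u ih => simpa using pvTriple_cons x _ ih

lemma pvTriple_snoc (t : List Int) (i : Int) (h : pvTriple (t ++ [i]) = true) :
    pvTriple t = true ∨ ∃ u a b, t = u ++ [a, b] ∧ i - a ≤ 5 := by
  induction t with
  | nil => simp [pvTriple] at h
  | cons x t ih =>
    match t, ih with
    | [], _ => simp [pvTriple] at h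
    | [y], _ =>
      right
      refine ⟨[], x, y, by simp, ?_⟩
      simpa [pvTriple] using h
    | y :: z :: t2, ih =>
      simp only [List.cons_append, pvTriple, Bool.or_eq_true, decide_eq_true_eq] at h
      rcases h with h | h
      · left; simp [pvTriple, h]
      · rcases ih (by simpa using h) with h' | ⟨u, a, b, heq, hab⟩
        · left; exact pvTriple_cons x _ h'
        · right; exact ⟨x :: u, a, b, by simp [heq], hab⟩

lemma pvDropOld_eq (i : Int) : ∀ l : List Int,
    pvDropOld i l = l.dropWhile (fun x => decide (5 < i - x)) := by
  intro l
  induction l with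
  | nil => rfl
  | cons x xs ih => by_cases h : 5 < i - x <;> simp [pvDropOld, h, ih]

lemma pvDropOld_snoc (i : Int) (l : List Int) :
    pvDropOld i (l ++ [i]) = l.dropWhile (fun x => decide (5 < i - x)) ++ [i] := by
  rw [pvDropOld_eq, List.dropWhile_append]
  split
  · next hemp =>
    simp only [List.isEmpty_iff] at hemp
    simp [hemp]
  · rfl

lemma pvStream_eq (s : List Int) : ∀ (d r : List Int),
    List.Pairwise (· < ·) (d ++ (r ++ s)) →
    (∀ x ∈ d, ∀ y ∈ s, 5 < y - x) →
    pvTriple (d ++ r) = false →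
    pvStream r s = pvTriple (d ++ (r ++ s)) := by
  induction s with
  | nil =>
    intro d r _ _ htrip
    simpa [pvStream] using htrip.symm
  | cons i s ih =>
    intro d r hchain hfar htrip
    have hsnoc : pvDropOld i (r ++ [i]) =
        r.dropWhile (fun x => decide (5 < i - x)) ++ [i] := pvDropOld_snoc i r
    obtain ⟨hd, hrest, hdcross⟩ := List.pairwise_append.mp hchain
    obtain ⟨hr, his, hrcross⟩ := List.pairwise_append.mp hrest
    have his' : ∀ y ∈ s, i < y := (List.pairwise_cons.mp his).1
    by_cases hlen : 3 ≤ (pvDropOld i (r ++ [i])).length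
    · have hs : pvStream r (i :: s) = true := by simp [pvStream, hlen]
      rw [hs]
      rw [hsnoc] at hlen
      simp only [List.length_append, List.length_cons, List.length_nil] at hlen
      have hlen2 : 2 ≤ (r.dropWhile (fun x => decide (5 < i - x))).length := by omega
      cases hdw : r.dropWhile (fun x => decide (5 < i - x)) with
      | nil => rw [hdw] at hlen2; simp at hlen2
      | cons a tl =>
        cases tl with
        | nil => rw [hdw] at hlen2; simp at hlen2
        | cons b r3 =>
          have hne : r.dropWhile (fun x => decide (5 < i - x)) ≠ [] := by rw [hdw]; simp
          have hpa := List.head_dropWhile_not (fun x => decide (5 < i - x)) hne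
          simp only [hdw, List.head_cons, decide_eq_false_iff_not, not_lt] at hpa
          -- hpa : i - a ≤ 5
          have hrsplit : r = r.takeWhile (fun x => decide (5 < i - x)) ++ (a :: b :: r3) := by
            conv_lhs => rw [← List.takeWhile_append_dropWhile
              (p := fun x => decide (5 < i - x)) (l := r)]
            rw [hdw]
          symm
          rw [hrsplit]
          cases r3 with
          | nil =>
            have : d ++ ((r.takeWhile (fun x => decide (5 < i - x)) ++ [a, b]) ++ i :: s) =
                (d ++ r.takeWhile (fun x => decide (5 < i - x))) ++ a :: b :: i :: s := by
              simp
            rw [this]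
            exact pvTriple_mid _ a b i s (by omega)
          | cons c r4 =>
            have hc_mem : c ∈ r := by rw [hrsplit]; simp
            have hci : c < i := hrcross c hc_mem i (by simp)
            have : d ++ ((r.takeWhile (fun x => decide (5 < i - x)) ++ a :: b :: c :: r4) ++ i :: s) =
                (d ++ r.takeWhile (fun x => decide (5 < i - x))) ++ a :: b :: c :: (r4 ++ i :: s) := by
              simp
            rw [this]
            exact pvTriple_mid _ a b c _ (by omega)
    · have hs : pvStream r (i :: s) = pvStream (pvDropOld i (r ++ [i])) s := by
        simp [pvStream, hlen]
      rw [hs, hsnoc]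
      have hjoin : (r.takeWhile (fun x => decide (5 < i - x))) ++
          ((r.dropWhile (fun x => decide (5 < i - x)) ++ [i]) ++ s) = r ++ i :: s := by
        rw [← List.append_assoc, ← List.append_assoc, List.takeWhile_append_dropWhile]
        simp
      have hlist : (d ++ r.takeWhile (fun x => decide (5 < i - x))) ++
          ((r.dropWhile (fun x => decide (5 < i - x)) ++ [i]) ++ s) = d ++ (r ++ i :: s) := by
        rw [List.append_assoc, hjoin]
      have hchain' : List.Pairwise (· < ·)
          ((d ++ r.takeWhile (fun x => decide (5 < i - x))) ++
            ((r.dropWhile (fun x => decide (5 < i - x)) ++ [i]) ++ s)) := by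
        rw [hlist]; exact hchain
      have hfar' : ∀ x ∈ d ++ r.takeWhile (fun x => decide (5 < i - x)), ∀ y ∈ s, 5 < y - x := by
        intro x hx y hy
        rcases List.mem_append.mp hx with hx | hx
        · exact hfar x hx y (List.mem_cons_of_mem i hy)
        · have hpx := List.mem_takeWhile_imp hx
          simp only [decide_eq_true_eq] at hpx
          have := his' y hy
          omega
      have htrip' : pvTriple ((d ++ r.takeWhile (fun x => decide (5 < i - x))) ++
          (r.dropWhile (fun x => decide (5 < i - x)) ++ [i])) = false := by
        have heq : (d ++ r.takeWhile (fun x => decide (5 < i - x))) ++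
            (r.dropWhile (fun x => decide (5 < i - x)) ++ [i]) = (d ++ r) ++ [i] := by
          rw [← List.append_assoc, List.append_assoc d,
            List.takeWhile_append_dropWhile]
        rw [heq]
        cases hT : pvTriple ((d ++ r) ++ [i]) with
        | false => rfl
        | true =>
          exfalso
          rcases pvTriple_snoc (d ++ r) i hT with h' | ⟨u, a, b, hsplit, hab⟩
          · rw [htrip] at h'; exact Bool.false_ne_true h'
          · -- a lies in d ++ takeWhile, since dropWhile has length ≤ 1 here
            rw [hsnoc] at hlen
            simp only [List.length_append, List.length_cons, List.length_nil, not_le] at hlen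
            have hdwlen : (r.dropWhile (fun x => decide (5 < i - x))).length ≤ 1 := by omega
            have hamem : a ∈ d ++ r.takeWhile (fun x => decide (5 < i - x)) := by
              have hsplit' : (d ++ r.takeWhile (fun x => decide (5 < i - x))) ++
                  r.dropWhile (fun x => decide (5 < i - x)) = u ++ [a, b] := by
                rw [List.append_assoc, List.takeWhile_append_dropWhile]; exact hsplit
              cases hdw : r.dropWhile (fun x => decide (5 < i - x)) with
              | nil =>
                rw [hdw, List.append_nil] at hsplit'
                rw [hsplit']; simp
              | cons z tl =>
                cases tl with
                | nil =>
                  rw [hdw] at hsplit'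
                  have h2 : (d ++ r.takeWhile (fun x => decide (5 < i - x))) ++ [z] =
                      (u ++ [a]) ++ [b] := by simpa using hsplit'
                  have h3 := (List.append_inj' h2 rfl).1
                  rw [h3]; simp
                | cons w tw => rw [hdw] at hdwlen; simp at hdwlen
            rcases List.mem_append.mp hamem with ha | ha
            · have := hfar a ha i (by simp)
              omega
            · have hpa := List.mem_takeWhile_imp ha
              simp only [decide_eq_true_eq] at hpa
              omega
      have := ih (d ++ r.takeWhile (fun x => decide (5 < i - x)))
        (r.dropWhile (fun x => decide (5 < i - x)) ++ [i]) hchain' hfar' htrip'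
      rw [this, hlist]

lemma existsTriple_iff (L : List Int) :
    pvTriple L = true ↔ ∃ k : Nat, k + 2 < L.length ∧ L.getD (k + 2) 0 - L.getD k 0 ≤ 5 := by
  induction L with
  | nil => simp [pvTriple]
  | cons a l ih =>
    match l, ih with
    | [], _ => simp [pvTriple]
    | [b], _ => simp [pvTriple]
    | b :: c :: t, ih =>
      simp only [pvTriple, Bool.or_eq_true, decide_eq_true_eq, ih]
      constructor
      · rintro (h | ⟨k, hk, h5⟩)
        · exact ⟨0, by simp, by simpa using h⟩
        · refine ⟨k + 1, by simp at hk ⊢; omega, ?_⟩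
          simpa [List.getD_cons_succ] using h5
      · rintro ⟨k, hk, h5⟩
        cases k with
        | zero => left; simpa using h5
        | succ k =>
          right
          refine ⟨k, by simp at hk ⊢; omega, ?_⟩
          simpa [List.getD_cons_succ] using h5

lemma anyRange_iff (L : List Int) :
    ((PySem.List.pyRange 0 ((L.length : Int) - 2) 1).any
      (fun i => decide (PySem.List.pyGetD L (i + 2) 0 - PySem.List.pyGetD L i 0 ≤ 5)) = true)
    ↔ ∃ k : Nat, k + 2 < L.length ∧ L.getD (k + 2) 0 - L.getD k 0 ≤ 5 := by
  rw [List.any_eq_true]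
  constructor
  · rintro ⟨i, hmem, hdec⟩
    rw [PySem.List.mem_pyRange_one] at hmem
    obtain ⟨k, rfl⟩ := Int.eq_ofNat_of_zero_le hmem.1
    refine ⟨k, by have := hmem.2; omega, ?_⟩
    have hcast : ((k : Int) + 2) = ((k + 2 : Nat) : Int) := by push_cast; ring
    rw [hcast, PySem.List.pyGetD_natCast, PySem.List.pyGetD_natCast] at hdec
    exact of_decide_eq_true hdec
  · rintro ⟨k, hk, h5⟩
    refine ⟨(k : Int), PySem.List.mem_pyRange_one.mpr ⟨by omega, by omega⟩, ?_⟩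
    have hcast : ((k : Int) + 2) = ((k + 2 : Nat) : Int) := by push_cast; ring
    rw [hcast, PySem.List.pyGetD_natCast, PySem.List.pyGetD_natCast]
    exact decide_eq_true h5

lemma A_eq_triple (seq : List Int) :
    detect_sandwich_pattern seq =
      pvTriple (((PySem.List.enumerate seq).filter
        (fun p => p.2 ∈ ([10, 14, 15, 20, 21] : List Int))).map (fun p => p.1)) := by
  simp only [detect_sandwich_pattern]
  rw [PySem.List.foldl_append_ite (fun x => x.2 ∈ ([10, 14, 15, 20, 21] : List Int)) Prod.fst
    (PySem.List.enumerate seq) []]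
  simp only [List.nil_append]
  set P := ((PySem.List.enumerate seq).filter
    (fun p => p.2 ∈ ([10, 14, 15, 20, 21] : List Int))).map Prod.fst with hP
  by_cases h3 : 3 ≤ P.length
  · simp only [h3, if_pos]
    have hiff := (anyRange_iff P).trans (existsTriple_iff P).symm
    cases hA : (PySem.List.pyRange 0 ((P.length : Int) - 2) 1).any
        (fun i => decide (PySem.List.pyGetD P (i + 2) 0 - PySem.List.pyGetD P i 0 ≤ 5)) with
    | true => exact hA.trans (hiff.mp hA).symm
    | false =>
      cases hB : pvTriple P with
      | false => exact hA
      | true => rw [hiff.mpr hB] at hA; exact absurd hA (by simp)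
  · simp only [h3, if_neg, not_false_eq_true]
    cases hB : pvTriple P with
    | false => rfl
    | true =>
      obtain ⟨k, hk, -⟩ := (existsTriple_iff P).mp hB
      omega

lemma altGo_eq (swaps : List Int) (l : List (Int × Int)) : ∀ r : List Int,
    pvAltGo swaps r l = pvStream r ((l.filter (fun p => p.2 ∈ swaps)).map (fun p => p.1)) := by
  induction l with
  | nil => intro r; simp [pvAltGo, pvStream]
  | cons q l ih =>
    intro r
    obtain ⟨i, ix⟩ := q
    by_cases h : ix ∈ swaps
    · simp only [pvAltGo, h, if_true, List.filter_cons, decide_true, List.map_cons, pvStream]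
      split
      · rfl
      · exact ih _
    · simp only [pvAltGo, h, List.filter_cons, decide_false, Bool.false_eq_true,
        not_false_eq_true, if_neg]
      exact ih r

lemma P_pairwise (seq : List Int) (swaps : List Int) :
    (((PySem.List.enumerate seq).filter (fun p => p.2 ∈ swaps)).map
      (fun p => p.1)).Pairwise (· < ·) := by
  rw [List.pairwise_map]
  exact (PySem.List.pairwise_lt_enumerate seq 0).filter _

-- ===== VERDICT (by name: the statement is the Claim_ definition above) =====
theorem detect_sandwich_pattern_spec : Claim_equal_detect_sandwich_pattern := by
  intro seq _
  unfold Spec_detect_sandwich_pattern detect_sandwich_pattern_alt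
  rw [A_eq_triple, altGo_eq]
  have := pvStream_eq (((PySem.List.enumerate seq).filter
      (fun p => p.2 ∈ ([10, 14, 15, 20, 21] : List Int))).map (fun p => p.1)) [] []
    (by simpa using P_pairwise seq [10, 14, 15, 20, 21])
    (by intro x hx; simp at hx)
    (by rfl)
  rw [this]
  simp
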